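-- pv_equiv track=rewrite | github.com/terrabit70/Project_3_Brackets_vaidator | Brackets_vaidator.py | bracket_index
-- ===== SOURCE A (Python) =====
-- opened_brackets = '([{'
--
-- closed_brackets = ')]}'
--
-- def bracket_index(bracket):
--     temporary_index = 0
--     if bracket in opened_brackets:
--         for ch in opened_brackets:
--             if opened_brackets[temporary_index] == bracket:
--                 return temporary_index
--             else:
--                 temporary_index += 1
--     else:
--         for ch in closed_brackets:
--             if closed_brackets[temporary_index] == bracket:
--                 return temporary_index
--             else:
--                 temporary_index += 1
-- ===== SOURCE B (Python) =====
-- # Closed-form arithmetic: each bracket's group index is ord(b)//40 - 1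
-- # (40,41 -> 0; 91,93 -> 1; 123,125 -> 2). No scans, no index table.
-- def bracket_index(bracket):
--     if bracket in ('(', ')', '[', ']', '{', '}'):
--         return ord(bracket) // 40 - 1
-- ===== Notes on version B (the rewrite author's own statement) =====
-- stated objective: simpler
-- what changed: Replaces the substring membership test and the two index-counting scan loops with a closed-form arithmetic formula on the character code (ord(b)//40 - 1), guarded by a membership check against the six bracket characters.
import Mathlib
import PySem

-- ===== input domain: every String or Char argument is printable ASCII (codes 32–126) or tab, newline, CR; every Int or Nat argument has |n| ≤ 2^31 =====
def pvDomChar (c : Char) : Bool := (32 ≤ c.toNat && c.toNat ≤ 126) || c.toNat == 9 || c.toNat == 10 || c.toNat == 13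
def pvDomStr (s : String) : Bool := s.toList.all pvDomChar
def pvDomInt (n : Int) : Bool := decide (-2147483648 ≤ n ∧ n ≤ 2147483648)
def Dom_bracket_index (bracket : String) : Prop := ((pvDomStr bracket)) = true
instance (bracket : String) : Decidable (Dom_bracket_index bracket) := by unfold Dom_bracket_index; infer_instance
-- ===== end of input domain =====

-- B replaces A's membership test and two index-counting scan loops by a closed-form
-- arithmetic formula on the character code, ord(b)//40 - 1 (objective: simpler).

-- ===== PORT A =====
def pvOpenedBrackets : String := "([{"
def pvClosedBrackets : String := ")]}"

-- the 'for ch in <src>' loop with the running temporary_index; src[temporary_index]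
-- is Python string indexing (a 1-char string), modelled by PySem.Str.pyGet? (Char);
-- the none case is unreachable (the index never leaves 0..2) and stands for IndexError
def pvScan (src : String) (bracket : String) : Int → List Char → Option Int
  | _, [] => none
  | idx, _ :: rest =>
    match PySem.Str.pyGet? src idx with
    | none => none
    | some c => if String.singleton c == bracket then some idx else pvScan src bracket (idx + 1) rest

def bracket_index (bracket : String) : Option Int :=
  let temporary_index : Int := 0
  if PySem.Str.isIn bracket pvOpenedBrackets then
    pvScan pvOpenedBrackets bracket temporary_index pvOpenedBrackets.toList
  else
    pvScan pvClosedBrackets bracket temporary_index pvClosedBrackets.toList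

-- ===== PORT B =====
-- Source B: if bracket in ('(', ')', '[', ']', '{', '}'): return ord(bracket) // 40 - 1
-- ord(bracket) on a guaranteed single-char string = code of its sole character
def bracket_index_alt (bracket : String) : Option Int :=
  if bracket = "(" ∨ bracket = ")" ∨ bracket = "[" ∨ bracket = "]" ∨ bracket = "{" ∨ bracket = "}" then
    some (PySem.Int.floordiv (Int.ofNat (bracket.toList.headD ' ').toNat) 40 - 1)
  else
    none

-- ===== PRECONDITION & SPEC =====
def Spec_bracket_index (bracket : String) (out : Option Int) : Prop := out = bracket_index_alt bracket
instance (bracket : String) (out : Option Int) : Decidable (Spec_bracket_index bracket out) := by unfold Spec_bracket_index; infer_instance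

-- ===== CLAIM (what is proved, stated in full; the proofs are below) =====
def Claim_equal_bracket_index : Prop := ∀ (bracket : String), Dom_bracket_index bracket → Spec_bracket_index bracket (bracket_index bracket)

-- ===== LEMMAS AND PROOFS =====

theorem bracket_index_eq_alt (bracket : String) :
    bracket_index bracket = bracket_index_alt bracket := by
  by_cases h1 : bracket = "("
  · subst h1; decide
  by_cases h2 : bracket = "["
  · subst h2; decide
  by_cases h3 : bracket = "{"
  · subst h3; decide
  by_cases h4 : bracket = ")"
  · subst h4; decide
  by_cases h5 : bracket = "]"
  · subst h5; decide
  by_cases h6 : bracket = "}"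
  · subst h6; decide
  -- generic case: both sides are none
  have ha : bracket_index bracket = none := by
    unfold bracket_index
    split
    · simp only [pvOpenedBrackets]
      norm_num [pvScan, PySem.Str.pyGet?, PySem.List.pyGet?, PySem.List.pyIdx?, String.singleton,
        show ("([{" : String).length = 3 from rfl, show ("([{" : String).toList = ['(', '[', '{'] from rfl,
        show ("".push '(') = "(" from rfl, show ("".push '[') = "[" from rfl, show ("".push '{') = "{" from rfl,
        Ne.symm h1, Ne.symm h2, Ne.symm h3]
      exact fun hc => absurd hc.symm h3
    · simp only [pvClosedBrackets]
      norm_num [pvScan, PySem.Str.pyGet?, PySem.List.pyGet?, PySem.List.pyIdx?, String.singleton,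
        show (")]}" : String).length = 3 from rfl, show (")]}" : String).toList = [')', ']', '}'] from rfl,
        show ("".push ')') = ")" from rfl, show ("".push ']') = "]" from rfl, show ("".push '}') = "}" from rfl,
        Ne.symm h4, Ne.symm h5, Ne.symm h6]
      exact fun hc => absurd hc.symm h6
  have hb : bracket_index_alt bracket = none := by
    simp [bracket_index_alt, h1, h2, h3, h4, h5, h6]
  rw [ha, hb]

-- ===== VERDICT (by name: the statement is the Claim_ definition above) =====
theorem bracket_index_spec : Claim_equal_bracket_index := by
  intro bracket _
  unfold Spec_bracket_index
  exact bracket_index_eq_alt bracket
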